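-- pv_equiv track=rewrite | github.com/Eleythra/Viona-Kaila | server/src/assistant/services/rule_engine.py | _menu_word_or_typo_in
-- ===== SOURCE A (Python) =====
-- def _menu_word_or_typo_in(t: str) -> bool:
--     """«bar mneü», menyu vb. yazım hataları dahil menü sinyali."""
--     if any(x in t for x in ("menü", "menu", "karta dań", "speisekarte", "menyu")):
--         return True
--     if "mneü" in t or "mneu" in t:
--         return True
--     if "mnü" in t or " mnu" in t or t.endswith("mnu"):
--         return True
--     return False
-- ===== SOURCE B (Python) =====
-- _PATTERNS = ("menü", "menu", "karta dań", "speisekarte", "menyu",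
--              "mneü", "mneu", "mnü", " mnu")
--
--
-- def _menu_word_or_typo_in(t: str) -> bool:
--     """Single left-to-right scan: at each position try every pattern once."""
--     for i in range(len(t)):
--         if any(t.startswith(p, i) for p in _PATTERNS):
--             return True
--     return t.endswith("mnu")
-- ===== Notes on version B (the rewrite author's own statement) =====
-- stated objective: alternative
-- what changed: Replaces A's chain of nine independent substring/endswith tests (each its own scan of t) with one left-to-right scan of t that tries every pattern as a prefix at each position, plus the single anchored endswith check.
import Mathlib
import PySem

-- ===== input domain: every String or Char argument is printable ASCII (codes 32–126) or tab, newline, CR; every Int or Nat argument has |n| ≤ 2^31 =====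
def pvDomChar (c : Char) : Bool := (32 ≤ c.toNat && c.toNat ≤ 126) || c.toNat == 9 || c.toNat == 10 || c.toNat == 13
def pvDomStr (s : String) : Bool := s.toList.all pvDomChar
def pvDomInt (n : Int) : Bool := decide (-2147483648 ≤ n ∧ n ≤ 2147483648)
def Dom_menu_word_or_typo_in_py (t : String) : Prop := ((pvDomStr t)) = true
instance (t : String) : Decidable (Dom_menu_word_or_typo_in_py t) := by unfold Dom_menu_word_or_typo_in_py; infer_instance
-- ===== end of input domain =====

-- B is an alternative single-pass scanner of t (one position loop trying every pattern),
-- instead of A's chain of nine independent substring searches; return values are identical.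

-- ===== PORT A =====
def menu_word_or_typo_in_py (t : String) : Bool :=
  if ["menü", "menu", "karta dań", "speisekarte", "menyu"].any
      (fun x => PySem.Str.isIn x t) then true
  else if PySem.Str.isIn "mneü" t || PySem.Str.isIn "mneu" t then true
  else if PySem.Str.isIn "mnü" t || PySem.Str.isIn " mnu" t
       || PySem.Str.endswith t "mnu" then true
  else false

-- ===== PORT B =====
def pvPatterns : List (List Char) :=
  ["menü".toList, "menu".toList, "karta dań".toList, "speisekarte".toList,
   "menyu".toList, "mneü".toList, "mneu".toList, "mnü".toList, " mnu".toList]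

-- the 'for i in range(len(t))' loop of Source B, as recursion over the suffixes of t
def pvScan : List Char → Bool
  | [] => false
  | c :: rest =>
    if pvPatterns.any (fun p => p.isPrefixOf (c :: rest)) then true else pvScan rest

def menu_word_or_typo_in_py_alt (t : String) : Bool :=
  if pvScan t.toList then true else PySem.Str.endswith t "mnu"

-- ===== PRECONDITION & SPEC =====
def Spec_menu_word_or_typo_in_py (t : String) (out : Bool) : Prop := out = menu_word_or_typo_in_py_alt t
instance (t : String) (out : Bool) : Decidable (Spec_menu_word_or_typo_in_py t out) := by unfold Spec_menu_word_or_typo_in_py; infer_instance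

-- ===== CLAIM =====
def Claim_equal_menu_word_or_typo_in_py : Prop :=
  ∀ (t : String), Dom_menu_word_or_typo_in_py t →
    Spec_menu_word_or_typo_in_py t (menu_word_or_typo_in_py t)

-- ===== LEMMAS AND PROOFS =====
lemma isIn_cons (p : List Char) (c : Char) (rest : List Char) :
    PySem.Chars.isIn p (c :: rest) = (p.isPrefixOf (c :: rest) || PySem.Chars.isIn p rest) := by
  rw [Bool.eq_iff_iff]
  simp only [Bool.or_eq_true, PySem.Chars.isIn_iff_infix, List.isPrefixOf_iff_prefix]
  exact List.infix_cons_iff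

lemma if_true_else (b c : Bool) : (if b then true else c) = (b || c) := by
  cases b <;> rfl

lemma if_else_false (b : Bool) : (if b then true else false) = b := by
  cases b <;> rfl

lemma any_or {α : Type} (l : List α) (p q : α → Bool) :
    (l.any fun x => p x || q x) = (l.any p || l.any q) := by
  induction l with
  | nil => rfl
  | cons x xs ih => simp only [List.any_cons, ih]; ac_rfl

lemma scan_eq (cs : List Char) :
    pvScan cs = pvPatterns.any (fun p => PySem.Chars.isIn p cs) := by
  induction cs with
  | nil => decide
  | cons c rest ih => rw [pvScan, if_true_else, ih, ← any_or]; simp only [isIn_cons]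

-- ===== VERDICT =====
theorem menu_word_or_typo_in_py_spec : Claim_equal_menu_word_or_typo_in_py := by
  intro t _
  unfold Spec_menu_word_or_typo_in_py menu_word_or_typo_in_py menu_word_or_typo_in_py_alt
  rw [scan_eq]
  rw [if_true_else, if_true_else, if_else_false, if_true_else]
  simp only [pvPatterns, List.any_cons, List.any_nil, Bool.or_false, PySem.Str.isIn_eq]
  ac_rfl
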